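-- pv_equiv track=rewrite | github.com/16pierre/traktorBeetsIntegration | utils.py | identify_compressed_value
-- ===== SOURCE A (Python) =====
-- def identify_compressed_value(value, values):
--     if isinstance(values[0], int):
--         try:
--             parsed_input = int(value)
--             if parsed_input in values:
--                 return parsed_input
--         except Exception:
--             return None
--     else:
--         value = value.lower()
--         lowercase_values = [v.lower() for v in values]
--         try:
--             found = lowercase_values.index(value)
--             return values[found]
--         except:
--             ...
--         compatible_values = [v for v in lowercase_values
--                              if _are_strings_compatible(value, v)]
--         if len(compatible_values) == 1:
--             return values[lowercase_values.index(compatible_values[0])]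
--         return None
--
-- def _are_strings_compatible(compressed, original):
--     compressed = compressed.lower()
--     original = original.lower()
--     if len(compressed) <= 0:
--         return True
--     if len(original) <= 0:
--         return False
--     s = compressed[0]
--     try:
--         index = original.index(s)
--         return _are_strings_compatible(compressed[1:], original[index+1:])
--     except Exception:
--         return False
-- ===== SOURCE B (Python) =====
-- def identify_compressed_value(value, values):
--     target = value.lower()
--     exact = None
--     compat = []
--     for v in values:
--         lv = v.lower()
--         if exact is None and lv == target:
--             exact = v
--         if _is_subseq(target, lv):
--             compat.append(v)
--     if exact is not None:
--         return exact
--     if len(compat) == 1: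
--         return compat[0]
--     return None
--
--
-- def _is_subseq(comp, orig):
--     # greedy leftmost subsequence check, iterating over orig once
--     rest = comp
--     for ch in orig:
--         if rest and rest[0] == ch:
--             rest = rest[1:]
--     return not rest
-- ===== Notes on version B (the rewrite author's own statement) =====
-- stated objective: faster
-- what changed: Single pass over the candidate list that tracks the first exact lowercase match and collects compatible candidates at once (instead of lowering the list, a try/index pass, a filter pass, and a second index pass), and the recursive index/slice subsequence test is replaced by an iterative scan over the original string consuming the compressed string greedily (no per-step string slicing or recursion).
import Mathlib
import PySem

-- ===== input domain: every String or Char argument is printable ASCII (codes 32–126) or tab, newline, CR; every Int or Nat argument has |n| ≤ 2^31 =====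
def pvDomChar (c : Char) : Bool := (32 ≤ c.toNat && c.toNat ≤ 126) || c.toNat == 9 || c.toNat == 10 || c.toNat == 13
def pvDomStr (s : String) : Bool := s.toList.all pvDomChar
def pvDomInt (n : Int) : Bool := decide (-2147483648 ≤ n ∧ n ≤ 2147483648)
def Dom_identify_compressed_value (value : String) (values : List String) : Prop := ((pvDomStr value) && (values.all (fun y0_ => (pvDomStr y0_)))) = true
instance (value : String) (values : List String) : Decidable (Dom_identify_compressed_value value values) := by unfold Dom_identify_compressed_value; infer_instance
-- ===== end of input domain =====

-- B replaces A's four passes (lowered copy, try/index, filter, second index) by one pass that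
-- tracks the first exact lowercase match and the compatible candidates together, and replaces the
-- recursive index/slice subsequence test by an iterative greedy scan of the original string.

-- ===== PORT A =====
-- _are_strings_compatible, on lists of chars; the Python re-lowers its arguments on every
-- recursive call, which is idempotent (lower_idem below), so lowering is done once in the
-- wrapper areCompatA — exact for all inputs.
def compatACore : List Char → List Char → Bool
  | [], _ => true
  | c :: cs, orig =>
    if orig.isEmpty then false                      -- len(original) <= 0
    else match PySem.List.index? orig c with        -- original.index(s); ValueError -> none
      | none => false
      | some i => compatACore cs (orig.drop (i + 1))

def areCompatA (compressed original : String) : Bool :=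
  compatACore (PySem.Chars.lower compressed.toList) (PySem.Chars.lower original.toList)

-- values : List String, so `isinstance(values[0], int)` is always False; on values = [] the Python
-- raises IndexError at values[0] (excluded by Pre_), so only the string branch is ported.
def identify_compressed_value (value : String) (values : List String) : Option String :=
  let value := PySem.Str.lower value
  let lows := values.map PySem.Str.lower
  match PySem.List.index? lows value with
  | some found => some (values.getD found "")       -- values[found]; found < values.length here
  | none =>
    let compatible := lows.filter (fun v => areCompatA value v)
    if compatible.length = 1 then
      match PySem.List.index? lows (compatible.headD "") with
      | some i => some (values.getD i "")           -- values[lowercase_values.index(...)]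
      | none => none                                -- unreachable: compatible[0] ∈ lows
    else none

-- ===== PORT B =====
-- _is_subseq from Source B: iterative greedy scan over orig, consuming the front of `rest`
def subseqB (comp orig : List Char) : Bool :=
  (orig.foldl (fun rest ch =>
      match rest with
      | [] => []
      | c :: cs => if c == ch then cs else rest) comp).isEmpty

-- loop body of Source B's single pass (state = (exact, compat))
def stepB (target : String) (st : Option String × List String) (v : String) :
    Option String × List String :=
  let lv := PySem.Str.lower v
  ((if st.1.isNone && (lv == target) then some v else st.1),
   (if subseqB target.toList lv.toList then st.2 ++ [v] else st.2))

def identify_compressed_value_alt (value : String) (values : List String) : Option String :=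
  let target := PySem.Str.lower value
  let r := values.foldl (stepB target) (none, [])
  match r.1 with
  | some v => some v
  | none => if r.2.length = 1 then some (r.2.headD "") else none

-- ===== PRECONDITION & SPEC =====
-- Pre_ excludes only the empty candidate list, on which the Python A raises IndexError (values[0]).
def Pre_identify_compressed_value (value : String) (values : List String) : Prop := values ≠ []
instance (value : String) (values : List String) : Decidable (Pre_identify_compressed_value value values) := by unfold Pre_identify_compressed_value; infer_instance

def pvWitness_identify_compressed_value : String × List String := ("fo", ["Foo", "bar"])

def Spec_identify_compressed_value (value : String) (values : List String) (out : Option String) : Prop := out = identify_compressed_value_alt value values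
instance (value : String) (values : List String) (out : Option String) : Decidable (Spec_identify_compressed_value value values out) := by unfold Spec_identify_compressed_value; infer_instance

-- ===== CLAIM (what is proved, stated in full; the proofs are below) =====
def Claim_equal_identify_compressed_value : Prop := ∀ (value : String) (values : List String), Dom_identify_compressed_value value values → Pre_identify_compressed_value value values → Spec_identify_compressed_value value values (identify_compressed_value value values)

-- ===== LEMMAS AND PROOFS =====

theorem lowerChar_idem (c : Char) :
    PySem.Chars.lowerChar (PySem.Chars.lowerChar c) = PySem.Chars.lowerChar c := by
  unfold PySem.Chars.lowerChar PySem.Chars.isupper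
  split_ifs with h1 h2 <;> try rfl
  · exfalso
    simp only [Bool.and_eq_true, decide_eq_true_eq, Char.le_def,
      UInt32.le_iff_toNat_le] at h1 h2
    have h1' : 65 ≤ c.toNat ∧ c.toNat ≤ 90 := h1
    have hv : (c.toNat + 32).isValidChar := Or.inl (by omega)
    have h2' : 65 ≤ (Char.ofNat (c.toNat + 32)).toNat ∧ (Char.ofNat (c.toNat + 32)).toNat ≤ 90 := h2
    rw [Char.toNat_ofNat, if_pos hv] at h2'
    omega

theorem lower_idem (s : List Char) :
    PySem.Chars.lower (PySem.Chars.lower s) = PySem.Chars.lower s := by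
  simp [PySem.Chars.lower, lowerChar_idem]

-- one step of A's recursive helper, expressed on the head of orig
theorem compatACore_cons (c : Char) (cs : List Char) (ch : Char) (rest : List Char) :
    compatACore (c :: cs) (ch :: rest)
      = if c = ch then compatACore cs rest else compatACore (c :: cs) rest := by
  by_cases h : ch = c
  · subst h
    rw [compatACore, PySem.List.index?_cons_self]; simp [List.drop]
  · rw [compatACore]
    rw [PySem.List.index?_cons_of_ne _ h]
    have hne : ¬ c = ch := fun e => h e.symm
    rw [if_neg hne]
    cases rest with
    | nil => simp [compatACore, PySem.List.index?]
    | cons r rs =>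
      rw [compatACore]
      simp only [List.isEmpty_cons, if_false, Bool.false_eq_true]
      cases hi : PySem.List.index? (r :: rs) c with
      | none => simp
      | some i => simp [List.drop_succ_cons]

theorem foldl_gnil (l : List Char) :
    (l.foldl (fun rest ch =>
      match rest with
      | ([] : List Char) => []
      | c :: cs => if c == ch then cs else rest) []) = [] := by
  induction l with
  | nil => rfl
  | cons ch l ih => simpa using ih

-- A's recursive helper and Source B's iterative scan agree
theorem compat_eq_subseq (orig comp : List Char) :
    compatACore comp orig = subseqB comp orig := by
  induction orig generalizing comp with
  | nil =>
    cases comp with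
    | nil => rfl
    | cons c cs => rfl
  | cons ch rest ih =>
    cases comp with
    | nil =>
      simp only [compatACore, subseqB, List.foldl_cons]
      rw [foldl_gnil]
      rfl
    | cons c cs =>
      rw [compatACore_cons]
      by_cases h : c = ch
      · subst h
        rw [if_pos rfl, ih cs]
        simp [subseqB]
      · rw [if_neg h, ih (c :: cs)]
        simp only [subseqB, List.foldl_cons]
        have : (c == ch) = false := by simpa using h
        simp [this]

-- A's "index into lows, then read values", as a find? on values
theorem indexLow (values : List String) (target : String) :
    (match PySem.List.index? (values.map PySem.Str.lower) target with
     | some i => some (values.getD i "")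
     | none => none)
      = values.find? (fun v => PySem.Str.lower v == target) := by
  induction values with
  | nil => rfl
  | cons v vs ih =>
    by_cases h : PySem.Str.lower v = target
    · simp only [List.map_cons, h, PySem.List.index?_cons_self, List.getD_cons_zero,
        List.find?_cons_of_pos, beq_self_eq_true]
    · rw [List.map_cons, PySem.List.index?_cons_of_ne _ h]
      rw [List.find?_cons_of_neg (by simpa using h)]
      rw [← ih]
      cases PySem.List.index? (vs.map PySem.Str.lower) target with
      | none => rfl
      | some i => simp

-- the state of Source B's single pass
theorem foldState (target : String) (values : List String) (e : Option String) (cl : List String) :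
    values.foldl (stepB target) (e, cl)
      = ((match e with
          | some x => some x
          | none => values.find? (fun v => PySem.Str.lower v == target)),
         cl ++ values.filter (fun v => subseqB target.toList (PySem.Str.lower v).toList)) := by
  induction values generalizing e cl with
  | nil => cases e <;> simp
  | cons v vs ih =>
    rw [List.foldl_cons, ih]
    cases e with
    | some x =>
      simp only [stepB, Option.isNone_some, Bool.false_and]
      rw [List.filter_cons]
      by_cases hp : subseqB target.toList (PySem.Chars.lower v.toList) = true
      · simp [hp, List.append_assoc]
      · simp [hp]
    | none =>
      simp only [stepB, Option.isNone_none, Bool.true_and]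
      rw [List.filter_cons, List.find?_cons]
      by_cases he : (PySem.Str.lower v == target) = true
      · rw [if_pos he, he]
        by_cases hp : subseqB target.toList (PySem.Chars.lower v.toList) = true
        · simp [hp, List.append_assoc]
        · simp [hp]
      · rw [if_neg he]
        simp only [he]
        by_cases hp : subseqB target.toList (PySem.Chars.lower v.toList) = true
        · simp [hp, List.append_assoc]
        · simp [hp]

-- A's filter over the lowered list is the lowered image of B's filter over values
theorem filterA_eq (value : String) (values : List String) :
    (values.map PySem.Str.lower).filter (fun v => areCompatA (PySem.Str.lower value) v)
      = (values.filter (fun v =>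
          subseqB (PySem.Str.lower value).toList (PySem.Str.lower v).toList)).map PySem.Str.lower := by
  rw [List.filter_map]
  congr 1
  apply List.filter_congr
  intro w _
  show areCompatA (PySem.Str.lower value) (PySem.Str.lower w)
      = subseqB (PySem.Str.lower value).toList (PySem.Str.lower w).toList
  unfold areCompatA
  rw [compat_eq_subseq]
  simp [PySem.Str.lower, lower_idem]

-- ===== VERDICT (by name: the statement is the Claim_ definition above) =====
theorem identify_compressed_value_spec : Claim_equal_identify_compressed_value := by
  intro value values _dom _pre
  unfold Spec_identify_compressed_value identify_compressed_value identify_compressed_value_alt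
  simp only []
  rw [foldState]
  simp only [List.nil_append]
  have hidx := indexLow values (PySem.Str.lower value)
  cases hfind : values.find? (fun v => PySem.Str.lower v == PySem.Str.lower value) with
  | some w =>
    rw [hfind] at hidx
    cases hI : PySem.List.index? (values.map PySem.Str.lower) (PySem.Str.lower value) with
    | none => rw [hI] at hidx; exact absurd hidx (by simp)
    | some i =>
      rw [hI] at hidx
      simpa using hidx
  | none =>
    rw [hfind] at hidx
    cases hI : PySem.List.index? (values.map PySem.Str.lower) (PySem.Str.lower value) with
    | some i => rw [hI] at hidx; exact absurd hidx (by simp)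
    | none =>
      simp only []
      rw [filterA_eq value values]
      rw [List.length_map]
      by_cases hl : (values.filter (fun v =>
          subseqB (PySem.Str.lower value).toList (PySem.Str.lower v).toList)).length = 1
      · rw [if_pos hl, if_pos hl]
        obtain ⟨w, hw⟩ := List.length_eq_one_iff.mp hl
        rw [hw]
        simp only [List.map_cons, List.map_nil, List.headD_cons]
        have hmemw : w ∈ values ∧
            subseqB (PySem.Str.lower value).toList (PySem.Str.lower w).toList = true := by
          have : w ∈ values.filter (fun v =>
              subseqB (PySem.Str.lower value).toList (PySem.Str.lower v).toList) := by
            rw [hw]; exact List.mem_singleton.mpr rfl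
          simpa using List.mem_filter.mp this
        have hfs : (values.find? (fun v => PySem.Str.lower v == PySem.Str.lower w)).isSome := by
          rw [List.find?_isSome]
          exact ⟨w, hmemw.1, by simp⟩
        obtain ⟨u, hu⟩ := Option.isSome_iff_exists.mp hfs
        have hIL := indexLow values (PySem.Str.lower w)
        rw [hu] at hIL
        have humem : u ∈ values := List.mem_of_find?_eq_some hu
        have hueq : PySem.Str.lower u = PySem.Str.lower w := by
          have := List.find?_some hu
          simpa using this
        have huw : u = w := by
          have huc : u ∈ values.filter (fun v =>
              subseqB (PySem.Str.lower value).toList (PySem.Str.lower v).toList) := by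
            refine List.mem_filter.mpr ⟨humem, ?_⟩
            simp only [hueq]
            simpa using hmemw.2
          rw [hw] at huc
          exact List.mem_singleton.mp huc
        cases hI2 : PySem.List.index? (values.map PySem.Str.lower) (PySem.Str.lower w) with
        | none => rw [hI2] at hIL; exact absurd hIL (by simp)
        | some i =>
          rw [hI2] at hIL
          have : values.getD i "" = u := by simpa using hIL
          show some (values.getD i "") = some w
          rw [this, huw]
      · rw [if_neg hl, if_neg hl]
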